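-- pv_equiv track=rewrite | github.com/AlexeyGulis/Algorithms | Heap, Priority Queue/design_twitter.py | help_funct
-- ===== SOURCE A (Python) =====
-- from typing import List
--
-- class Twitter:
--     user_twit = None
--     twit_user = None
--     twits = None
--     followers = None
--
--     def __init__(self):
--         self.user_twit = {}
--         self.twit_user = {}
--         self.twits = []
--         self.followers = {}
--
--     def postTweet(self, userId: int, tweetId: int) -> None:
--         if userId in self.user_twit:
--             self.user_twit[userId].append(tweetId)
--         else:
--             self.user_twit[userId] = [tweetId]
--         self.twit_user[tweetId] = userId
--         self.twits.append(tweetId)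
--
--     def getNewsFeed(self, userId: int) -> List[int]:
--         j = 0
--         twit_news = []
--         for i in range(len(self.twits) - 1, -1, -1):
--             if j == 10:
--                 break
--             if self.twit_user[self.twits[i]] == userId:
--                 twit_news.append(self.twits[i])
--                 j += 1
--             else:
--                 if userId in self.followers:
--                     if self.twit_user[self.twits[i]] in self.followers[userId]:
--                         twit_news.append(self.twits[i])
--                         j += 1
--         return twit_news
--
--     def follow(self, followerId: int, followeeId: int) -> None:
--         if followerId in self.followers:
--             if followeeId not in self.followers[followerId]:
--                 self.followers[followerId].append(followeeId)
--         else: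
--             self.followers[followerId] = [followeeId]
--
--     def unfollow(self, followerId: int, followeeId: int) -> None:
--         if followerId in self.followers:
--             if followeeId in self.followers[followerId]:
--                 del self.followers[followerId][self.followers[followerId].index(followeeId)]
--
-- def help_funct(list1,list2):
--     answer = []
--     obj = None
--     for i in range(len(list1)):
--         if list1[i] == 'Twitter':
--             obj = Twitter()
--             answer.append(None)
--         if list1[i] == 'postTweet':
--             answer.append(obj.postTweet(list2[i][0],list2[i][1]))
--         if list1[i] == 'getNewsFeed':
--             answer.append(obj.getNewsFeed(list2[i][0]))
--         if list1[i] == 'follow':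
--             answer.append(obj.follow(list2[i][0], list2[i][1]))
--         if list1[i] == 'unfollow':
--             answer.append(obj.unfollow(list2[i][0], list2[i][1]))
--
--     return answer
-- ===== SOURCE B (Python) =====
-- from typing import List
--
-- class _Feed:
--     """Per-user chronological tweet lists; feed = sort-merge of followees' tweets."""
--
--     def __init__(self):
--         self.time = 0
--         self.tweets = {}      # userId -> [(time, tweetId)] in chronological order
--         self.following = {}   # userId -> list of followees (no duplicates)
--
--     def postTweet(self, userId, tweetId):
--         self.tweets.setdefault(userId, []).append((self.time, tweetId))
--         self.time += 1
--
--     def getNewsFeed(self, userId):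
--         cands = [userId] + [u for u in self.following.get(userId, []) if u != userId]
--         items = []
--         for u in cands:
--             items.extend(self.tweets.get(u, []))
--         items.sort(key=lambda p: p[0], reverse=True)
--         return [tid for _, tid in items[:10]]
--
--     def follow(self, followerId, followeeId):
--         fl = self.following.setdefault(followerId, [])
--         if followeeId not in fl:
--             fl.append(followeeId)
--
--     def unfollow(self, followerId, followeeId):
--         fl = self.following.get(followerId)
--         if fl is not None and followeeId in fl:
--             fl.remove(followeeId)
--
-- def help_funct(list1, list2):
--     answer = []
--     obj = None
--     for i in range(len(list1)):
--         cmd = list1[i]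
--         if cmd == 'Twitter':
--             obj = _Feed()
--             answer.append(None)
--         elif cmd == 'postTweet':
--             answer.append(obj.postTweet(list2[i][0], list2[i][1]))
--         elif cmd == 'getNewsFeed':
--             answer.append(obj.getNewsFeed(list2[i][0]))
--         elif cmd == 'follow':
--             answer.append(obj.follow(list2[i][0], list2[i][1]))
--         elif cmd == 'unfollow':
--             answer.append(obj.unfollow(list2[i][0], list2[i][1]))
--     return answer
-- ===== Notes on version B (the rewrite author's own statement) =====
-- stated objective: alternative
-- what changed: Replaces the single global tweet log that A rescans backwards on every getNewsFeed (attributing each tweet via a tweetId->user dict) with per-user timestamped tweet lists; a feed concatenates only the queried user's and followees' lists and sorts them by time descending. Pre_ excludes inputs where A raises (an operation before any 'Twitter' -> AttributeError, a missing/short argument row -> IndexError) and inputs that post the same tweet id twice, where A's twit_user dict overwrite silently re-attributes every copy of the id to its last poster - an accidental duplicate-key behaviour.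
import Mathlib
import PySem

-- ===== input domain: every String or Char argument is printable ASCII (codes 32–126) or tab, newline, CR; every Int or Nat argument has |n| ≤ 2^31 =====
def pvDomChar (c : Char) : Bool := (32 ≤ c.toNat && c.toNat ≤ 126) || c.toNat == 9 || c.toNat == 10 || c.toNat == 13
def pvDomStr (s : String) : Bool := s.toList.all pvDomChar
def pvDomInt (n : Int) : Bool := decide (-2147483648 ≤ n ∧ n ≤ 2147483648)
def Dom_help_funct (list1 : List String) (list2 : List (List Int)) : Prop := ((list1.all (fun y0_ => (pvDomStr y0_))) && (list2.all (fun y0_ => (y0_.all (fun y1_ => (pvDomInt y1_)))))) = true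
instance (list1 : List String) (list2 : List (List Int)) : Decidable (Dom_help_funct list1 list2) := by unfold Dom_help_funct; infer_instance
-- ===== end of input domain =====

-- B replaces A's backward scan of the single global tweet log on every getNewsFeed by per-user
-- timestamped tweet lists merged by a sort per feed query (objective: alternative algorithm).

-- ===== PORT A =====
-- Twitter object state: user_twit, twit_user, twits, followers
structure TwA where
  ut : PySem.Dict Int (List Int)
  tu : PySem.Dict Int Int
  tw : List Int
  fo : PySem.Dict Int (List Int)
deriving Repr, DecidableEq

def twInit : TwA := ⟨PySem.Dict.empty, PySem.Dict.empty, [], PySem.Dict.empty⟩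

-- postTweet
def postA (o : TwA) (userId tweetId : Int) : TwA :=
  { o with
    ut := if o.ut.contains userId then o.ut.modify userId [] (· ++ [tweetId])
          else o.ut.insert userId [tweetId],
    tu := o.tu.insert tweetId userId,
    tw := o.tw ++ [tweetId] }

-- the body of getNewsFeed's for-loop over the descending index range, with counter j and accumulator
def feedAGo (o : TwA) (userId : Int) : List Int → Int → List Int → List Int
  | [], _, acc => acc
  | i :: rest, j, acc =>
    if j = 10 then acc
    else
      let t := PySem.List.pyGetD o.tw i 0   -- index is always in range on reachable states
      if o.tu.getD t 0 = userId then feedAGo o userId rest (j + 1) (acc ++ [t])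
      else if o.fo.contains userId then
        if (o.fo.getD userId []).contains (o.tu.getD t 0) then feedAGo o userId rest (j + 1) (acc ++ [t])
        else feedAGo o userId rest j acc
      else feedAGo o userId rest j acc

-- getNewsFeed: scan the global log back to front, collecting up to 10 matching tweets
def feedA (o : TwA) (userId : Int) : List Int :=
  feedAGo o userId (PySem.List.pyRange ((o.tw.length : Int) - 1) (-1) (-1)) 0 []

-- follow
def followA (o : TwA) (followerId followeeId : Int) : TwA :=
  { o with fo :=
      if o.fo.contains followerId then
        (if (o.fo.getD followerId []).contains followeeId then o.fo
         else o.fo.modify followerId [] (· ++ [followeeId]))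
      else o.fo.insert followerId [followeeId] }

-- unfollow: del followers[f][followers[f].index(e)]
def unfollowA (o : TwA) (followerId followeeId : Int) : TwA :=
  if o.fo.contains followerId then
    let fl := o.fo.getD followerId []
    if fl.contains followeeId then
      let fl' := match PySem.List.index? fl followeeId with
        | some i => fl.eraseIdx i
        | none => fl
      { o with fo := o.fo.insert followerId fl' }
    else o
  else o

-- one command dispatch (Python's sequential ifs: the command strings are mutually exclusive)
def stepA (l2 : List (List Int)) (st : Option TwA × List (Option (List Int))) (p : Int × String) :
    Option TwA × List (Option (List Int)) :=
  let row := PySem.List.pyGetD l2 p.1 []   -- Pre_ excludes IndexError (list2 too short)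
  if p.2 = "Twitter" then (some twInit, st.2 ++ [none])
  else
    match st.1 with
    | none => st   -- Python raises AttributeError here; excluded by Pre_
    | some o =>
      if p.2 = "postTweet" then
        (some (postA o (PySem.List.pyGetD row 0 0) (PySem.List.pyGetD row 1 0)), st.2 ++ [none])
      else if p.2 = "getNewsFeed" then
        (st.1, st.2 ++ [some (feedA o (PySem.List.pyGetD row 0 0))])
      else if p.2 = "follow" then
        (some (followA o (PySem.List.pyGetD row 0 0) (PySem.List.pyGetD row 1 0)), st.2 ++ [none])
      else if p.2 = "unfollow" then
        (some (unfollowA o (PySem.List.pyGetD row 0 0) (PySem.List.pyGetD row 1 0)), st.2 ++ [none])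
      else st

def help_funct (list1 : List String) (list2 : List (List Int)) : List (Option (List Int)) :=
  ((PySem.List.enumerate list1 0).foldl (stepA list2) (none, [])).2

-- ===== PORT B =====
-- _Feed object state: time counter, per-user (time, tweetId) lists, following lists
structure TwB where
  time : Int
  tweets : PySem.Dict Int (List (Int × Int))
  following : PySem.Dict Int (List Int)
deriving Repr, DecidableEq

def tbInit : TwB := ⟨0, PySem.Dict.empty, PySem.Dict.empty⟩

-- postTweet: tweets.setdefault(u, []).append((time, t)); time += 1
def postB (o : TwB) (userId tweetId : Int) : TwB :=
  { o with
    tweets := o.tweets.modify userId [] (· ++ [(o.time, tweetId)]),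
    time := o.time + 1 }

-- getNewsFeed: concatenate own + followees' tweet lists, sort by time descending, take 10
def feedB (o : TwB) (userId : Int) : List Int :=
  let cands := userId :: ((o.following.getD userId []).filter (fun u => !(u == userId)))
  let items := cands.foldl (fun acc u => acc ++ o.tweets.getD u []) []
  let srt := PySem.List.sorted items (fun p => p.1) true
  (PySem.List.slice srt none (some 10)).map (fun p => p.2)

-- follow: fl = following.setdefault(f, []); if e not in fl: fl.append(e)
def followB (o : TwB) (followerId followeeId : Int) : TwB :=
  let d := o.following.setdefault followerId []
  if (d.getD followerId []).contains followeeId then { o with following := d }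
  else { o with following := d.modify followerId [] (· ++ [followeeId]) }

-- unfollow: fl = following.get(f); if fl is not None and e in fl: fl.remove(e)
def unfollowB (o : TwB) (followerId followeeId : Int) : TwB :=
  match o.following.get? followerId with
  | none => o
  | some fl =>
    if fl.contains followeeId then
      { o with following := o.following.insert followerId ((PySem.List.remove? fl followeeId).getD fl) }
    else o

-- one command dispatch (Source B's elif chain)
def stepB (l2 : List (List Int)) (st : Option TwB × List (Option (List Int))) (p : Int × String) :
    Option TwB × List (Option (List Int)) :=
  let row := PySem.List.pyGetD l2 p.1 []   -- Pre_ excludes IndexError (list2 too short)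
  if p.2 = "Twitter" then (some tbInit, st.2 ++ [none])
  else
    match st.1 with
    | none => st   -- Source B raises AttributeError here too; excluded by Pre_
    | some o =>
      if p.2 = "postTweet" then
        (some (postB o (PySem.List.pyGetD row 0 0) (PySem.List.pyGetD row 1 0)), st.2 ++ [none])
      else if p.2 = "getNewsFeed" then
        (st.1, st.2 ++ [some (feedB o (PySem.List.pyGetD row 0 0))])
      else if p.2 = "follow" then
        (some (followB o (PySem.List.pyGetD row 0 0) (PySem.List.pyGetD row 1 0)), st.2 ++ [none])
      else if p.2 = "unfollow" then
        (some (unfollowB o (PySem.List.pyGetD row 0 0) (PySem.List.pyGetD row 1 0)), st.2 ++ [none])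
      else st

def help_funct_alt (list1 : List String) (list2 : List (List Int)) : List (Option (List Int)) :=
  ((PySem.List.enumerate list1 0).foldl (stepB list2) (none, [])).2

-- ===== PRECONDITION & SPEC =====
-- the tweet ids passed to the postTweet commands, in order
def postedIds (l1 : List String) (l2 : List (List Int)) : List Int :=
  (PySem.List.enumerate l1 0).filterMap
    (fun p => if p.2 = "postTweet" then some (PySem.List.pyGetD (PySem.List.pyGetD l2 p.1 []) 1 0) else none)

-- Pre_ excludes the inputs where the Python raises (a postTweet/getNewsFeed/follow/unfollow command
-- before any 'Twitter' → AttributeError; a missing or too-short argument row → IndexError) and, slightly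
-- more strongly than needed (distinct ids per 'Twitter' object would suffice), inputs that post the same
-- tweet id twice — there A's twit_user dict overwrite silently re-attributes every copy of the duplicated
-- id to its last poster, an accidental duplicate-key behaviour no caller would specify.
def Pre_help_funct (list1 : List String) (list2 : List (List Int)) : Prop :=
  (∀ p ∈ PySem.List.enumerate list1 0,
      p.2 ∈ (["postTweet", "getNewsFeed", "follow", "unfollow"] : List String) →
        (∃ q ∈ PySem.List.enumerate list1 0, q.1 < p.1 ∧ q.2 = "Twitter") ∧
        p.1 < (list2.length : Int) ∧
        (if p.2 = "getNewsFeed" then 1 else 2) ≤ (PySem.List.pyGetD list2 p.1 []).length)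
  ∧ (postedIds list1 list2).Nodup

instance (list1 : List String) (list2 : List (List Int)) : Decidable (Pre_help_funct list1 list2) := by
  unfold Pre_help_funct; infer_instance

def pvWitness_help_funct : List String × List (List Int) :=
  (["Twitter", "postTweet", "follow", "postTweet", "getNewsFeed"],
   [[], [1, 5], [2, 1], [2, 7], [2]])

def Spec_help_funct (list1 : List String) (list2 : List (List Int)) (out : List (Option (List Int))) : Prop := out = help_funct_alt list1 list2
instance (list1 : List String) (list2 : List (List Int)) (out : List (Option (List Int))) : Decidable (Spec_help_funct list1 list2 out) := by unfold Spec_help_funct; infer_instance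

-- ===== CLAIM (what is proved, stated in full; the proofs are below) =====
def Claim_equal_help_funct : Prop := ∀ (list1 : List String) (list2 : List (List Int)), Dom_help_funct list1 list2 → Pre_help_funct list1 list2 → Spec_help_funct list1 list2 (help_funct list1 list2)

-- ===== LEMMAS AND PROOFS =====

-- abstraction of both states from the ghost post log L : List (userId × tweetId)
def tuOf (L : List (Int × Int)) : PySem.Dict Int Int :=
  L.foldl (fun d p => d.insert p.2 p.1) PySem.Dict.empty

def tlOf (L : List (Int × Int)) : PySem.Dict Int (List (Int × Int)) :=
  (PySem.List.enumerate L 0).foldl (fun d q => d.modify q.2.1 [] (· ++ [(q.1, q.2.2)])) PySem.Dict.empty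

def StInv (oA : TwA) (oB : TwB) (L : List (Int × Int)) : Prop :=
  oA.tw = L.map (·.2) ∧
  oA.tu = tuOf L ∧
  oB.tweets = tlOf L ∧
  oB.time = (L.length : Int) ∧
  oB.following = oA.fo ∧
  ∀ k : Int, (oA.fo.getD k []).Nodup

-- relation between the two loop states
def RelSt : Option TwA → Option TwB → List (Int × Int) → Prop
  | none, none, L => L = []
  | some oA, some oB, L => StInv oA oB L
  | _, _, _ => False

-- tweet ids demanded fresh by the remaining commands
def postedOf (l2 : List (List Int)) (ps : List (Int × String)) : List Int :=
  ps.filterMap (fun p => if p.2 = "postTweet" then some (PySem.List.pyGetD (PySem.List.pyGetD l2 p.1 []) 1 0) else none)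

-- feed equality: A’s backward scan = B’s sort-merge, via the ghost log L

def scanA (o : TwA) (u : Int) : List Int → Int → List Int → List Int
  | [], _, acc => acc
  | t :: ts, j, acc =>
    if j = 10 then acc
    else if o.tu.getD t 0 = u then scanA o u ts (j + 1) (acc ++ [t])
    else if o.fo.contains u then
      if (o.fo.getD u []).contains (o.tu.getD t 0) then scanA o u ts (j + 1) (acc ++ [t])
      else scanA o u ts j acc
    else scanA o u ts j acc

def paPred (o : TwA) (u : Int) (t : Int) : Bool :=
  (o.tu.getD t 0 == u) || (o.fo.contains u && (o.fo.getD u []).contains (o.tu.getD t 0))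

theorem revRange (n : Nat) :
    PySem.List.pyRange ((n : Int) - 1) (-1) (-1) = (List.range n).map (fun k : Nat => ((n : Int) - 1) - (k : Int)) := by
  rcases n with _ | m
  · simp [PySem.List.pyRange]
  · have hlt : (-1 : Int) < ((m + 1 : Nat) : Int) - 1 := by push_cast; omega
    have hcnt : ((((m + 1 : Nat) : Int) - 1 - (-1) + - (-1) - 1) / - (-1)).toNat = m + 1 := by
      push_cast; omega
    simp only [PySem.List.pyRange, if_neg (by norm_num : ¬ (-1 : Int) = 0),
      if_neg (by norm_num : ¬ (0 : Int) < -1), if_pos hlt, hcnt]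
    exact List.map_congr_left fun k _ => by ring

theorem feedAGo_eq_scan (o : TwA) (u : Int) :
    ∀ (m : Nat), m ≤ o.tw.length → ∀ (j : Int) (acc : List Int),
      feedAGo o u ((List.range m).map (fun k : Nat => ((m : Int) - 1) - (k : Int))) j acc =
        scanA o u ((o.tw.take m).reverse) j acc := by
  intro m
  induction m with
  | zero => intro _ j acc; simp only [List.range_zero, List.map_nil, List.take_zero, List.reverse_nil]; rfl
  | succ m ih =>
    intro hm j acc
    have hmlt : m < o.tw.length := hm
    have hhead : (List.range (m + 1)).map (fun k : Nat => ((m + 1 : Nat) : Int) - 1 - (k : Int)) =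
        ((m : Nat) : Int) :: (List.range m).map (fun k : Nat => ((m : Nat) : Int) - 1 - (k : Int)) := by
      rw [List.range_succ_eq_map]
      simp only [List.map_cons, List.map_map]
      refine congrArg₂ List.cons (by push_cast; ring) (List.map_congr_left fun k _ => ?_)
      simp only [Function.comp_apply]
      push_cast; ring
    have htake : (o.tw.take (m + 1)).reverse = o.tw[m] :: (o.tw.take m).reverse := by
      rw [List.take_add_one]
      simp [List.getElem?_eq_getElem hmlt]
    have ht : PySem.List.pyGetD o.tw ((m : Nat) : Int) 0 = o.tw[m] := by
      rw [PySem.List.pyGetD_natCast]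
      simp [List.getD, List.getElem?_eq_getElem hmlt]
    rw [hhead, htake]
    simp only [feedAGo, scanA, ht]
    have ihm := fun (j : Int) (acc : List Int) => ih (le_of_lt hmlt) j acc
    split_ifs <;> first | rfl | exact ihm _ _

theorem scanA_eq (o : TwA) (u : Int) :
    ∀ (ts : List Int) (j : Int) (acc : List Int), 0 ≤ j → j ≤ 10 →
      scanA o u ts j acc = acc ++ (ts.filter (paPred o u)).take (10 - j).toNat := by
  intro ts
  induction ts with
  | nil => intro j acc _ _; simp [scanA]
  | cons t ts ih =>
    intro j acc h0 h10
    by_cases hj : j = 10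
    · subst hj; simp [scanA]
    · have hsucc : (10 - j).toNat = (10 - (j + 1)).toNat + 1 := by omega
      simp only [scanA, if_neg hj]
      by_cases h1 : o.tu.getD t 0 = u
      · have hp : paPred o u t = true := by simp [paPred, h1]
        rw [if_pos h1, ih (j + 1) (acc ++ [t]) (by omega) (by omega)]
        simp [hp, hsucc, List.append_assoc]
      · rw [if_neg h1]
        by_cases h2 : o.fo.contains u
        · rw [if_pos h2]
          by_cases h3 : (o.fo.getD u []).contains (o.tu.getD t 0)
          · have hp : paPred o u t = true := by
              simp [paPred, h2]
              exact Or.inr (by simpa using h3)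
            rw [if_pos h3, ih (j + 1) (acc ++ [t]) (by omega) (by omega)]
            simp [hp, hsucc, List.append_assoc]
          · have hp : paPred o u t = false := by
              simp [paPred, h1, h2]
              simpa using h3
            rw [if_neg h3, ih j acc h0 h10]
            simp [hp]
        · have hp : paPred o u t = false := by simp [paPred, h1, h2]
          rw [if_neg h2, ih j acc h0 h10]
          simp [hp]

theorem feedA_closed (o : TwA) (u : Int) :
    feedA o u = (o.tw.reverse.filter (paPred o u)).take 10 := by
  unfold feedA
  rw [revRange o.tw.length, feedAGo_eq_scan o u o.tw.length le_rfl 0 [],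
    scanA_eq o u _ 0 [] (by omega) (by omega), List.take_length]
  rfl

theorem enum_fst_ge {α : Type} :
    ∀ (L : List α) (s : Int) (q : Int × α), q ∈ PySem.List.enumerate L s → s ≤ q.1 := by
  intro L
  induction L with
  | nil => intro s q h; simp [PySem.List.enumerate] at h
  | cons x t ih =>
    intro s q h
    simp only [PySem.List.enumerate, List.mem_cons] at h
    rcases h with h | h
    · subst h; exact le_refl s
    · have := ih (s + 1) q h; omega

theorem enum_pairwise {α : Type} :
    ∀ (L : List α) (s : Int), (PySem.List.enumerate L s).Pairwise (fun a b => a.1 < b.1) := by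
  intro L
  induction L with
  | nil => intro s; simp [PySem.List.enumerate]
  | cons x t ih =>
    intro s
    simp only [PySem.List.enumerate]
    refine List.Pairwise.cons (fun q hq => ?_) (ih (s + 1))
    have := enum_fst_ge t (s + 1) q hq; omega

theorem getD_tlOf (L : List (Int × Int)) (c : Int) :
    (tlOf L).getD c [] =
      ((PySem.List.enumerate L 0).filter (fun q => q.2.1 == c)).map (fun q => (q.1, q.2.2)) := by
  have h : tlOf L = ((PySem.List.enumerate L 0).map
      (fun q : Int × (Int × Int) => (q.2.1, (q.1, q.2.2)))).foldl
      (fun d p => d.modify p.1 [] (· ++ [p.2])) PySem.Dict.empty := by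
    rw [List.foldl_map]; rfl
  rw [h, PySem.Dict.getD_foldl_modify_append, List.filter_map, List.map_map]
  simp [PySem.Dict.getD_empty, Function.comp_def]

theorem getD_foldl_insert_skip :
    ∀ (M : List (Int × Int)) (d : PySem.Dict Int Int) (t : Int), (∀ p ∈ M, p.2 ≠ t) →
      (M.foldl (fun d p => d.insert p.2 p.1) d).getD t 0 = d.getD t 0 := by
  intro M
  induction M with
  | nil => intro d t _; rfl
  | cons p M ih =>
    intro d t h
    simp only [List.foldl_cons]
    rw [ih _ t (fun q hq => h q (List.mem_cons_of_mem _ hq)), PySem.Dict.getD_insert]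
    exact if_neg (fun he => h p List.mem_cons_self he.symm)

theorem getD_tuOf (L : List (Int × Int)) (a t : Int)
    (hmem : (a, t) ∈ L) (hnd : (L.map (·.2)).Nodup) : (tuOf L).getD t 0 = a := by
  unfold tuOf
  suffices h : ∀ (L : List (Int × Int)) (d : PySem.Dict Int Int), (a, t) ∈ L →
      (L.map (·.2)).Nodup → (L.foldl (fun d p => d.insert p.2 p.1) d).getD t 0 = a by
    exact h L _ hmem hnd
  intro L
  induction L with
  | nil => intro d h; simp at h
  | cons p M ih =>
    intro d hmem hnd
    simp only [List.map_cons, List.nodup_cons] at hnd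
    rcases List.mem_cons.mp hmem with h | h
    · subst h
      simp only [List.foldl_cons]
      rw [getD_foldl_insert_skip M _ t (fun q hq he => hnd.1 (List.mem_map.mpr ⟨q, hq, he⟩)),
        PySem.Dict.getD_insert_self]
    · simp only [List.foldl_cons]
      exact ih _ h hnd.2

theorem filter_or_perm {α : Type} (p q : α → Bool) :
    ∀ (l : List α), (∀ x ∈ l, ¬(p x = true ∧ q x = true)) →
      (l.filter (fun x => p x || q x)).Perm (l.filter p ++ l.filter q) := by
  intro l
  induction l with
  | nil => intro _; simp
  | cons a l ih =>
    intro h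
    have ih' := ih (fun x hx => h x (List.mem_cons_of_mem _ hx))
    by_cases hp : p a = true
    · have hq : q a = false := by
        by_contra hq'
        exact h a List.mem_cons_self ⟨hp, by simpa using hq'⟩
      simp only [List.filter_cons, hp, hq, Bool.true_or, if_pos, Bool.false_eq_true, if_false,
        List.cons_append]
      exact List.Perm.cons a ih'
    · by_cases hq : q a = true
      · have hp' : p a = false := by simpa using hp
        simp only [List.filter_cons, hp', hq, Bool.false_or, if_pos, Bool.false_eq_true, if_false]
        exact (List.Perm.cons a ih').trans List.perm_middle.symm
      · have hp' : p a = false := by simpa using hp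
        have hq' : q a = false := by simpa using hq
        simp only [List.filter_cons, hp', hq', Bool.false_or, Bool.false_eq_true, if_false]
        exact ih'

theorem flatMap_filter_perm {α : Type} (key : α → Int) (l : List α) :
    ∀ (cs : List Int), cs.Nodup →
      (cs.flatMap (fun c => l.filter (fun x => key x == c))).Perm
        (l.filter (fun x => decide (key x ∈ cs))) := by
  intro cs
  induction cs with
  | nil => intro _; simp
  | cons c cs ih =>
    intro hnd
    rcases List.nodup_cons.mp hnd with ⟨hc, hnd'⟩
    simp only [List.flatMap_cons]
    have hdisj : ∀ x ∈ l, ¬((key x == c) = true ∧ (decide (key x ∈ cs)) = true) := by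
      intro x _ hx
      rcases hx with ⟨h1, h2⟩
      have h1' : key x = c := by simpa using h1
      exact hc (h1' ▸ of_decide_eq_true h2)
    have hperm := filter_or_perm (fun x => key x == c) (fun x => decide (key x ∈ cs)) l hdisj
    have hcong : (l.filter (fun x => decide (key x ∈ c :: cs))) =
        (l.filter (fun x => (key x == c) || decide (key x ∈ cs))) := by
      refine List.filter_congr fun x _ => ?_
      by_cases hx : key x = c <;> simp [List.mem_cons, hx]
    rw [hcong]
    exact ((ih hnd').append_left _).trans hperm.symm

theorem feed_eq (oA : TwA) (oB : TwB) (L : List (Int × Int)) (u : Int)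
    (hInv : StInv oA oB L) (hnd : (L.map (·.2)).Nodup) : feedA oA u = feedB oB u := by
  obtain ⟨h1, h2, h3, h4, h5, h6⟩ := hInv
  -- shared predicate on the posting user
  set P : Int → Bool := fun v => (v == u) || (oA.fo.contains u && (oA.fo.getD u []).contains v)
    with hP
  set E := PySem.List.enumerate L 0 with hE
  set F := E.filter (fun q => P q.2.1) with hF
  -- ==== A side ====
  have hattr : ∀ p ∈ L.reverse, (paPred oA u ∘ fun x : Int × Int => x.2) p = P p.1 := by
    intro p hp
    have hmem : (p.1, p.2) ∈ L := by simpa using List.mem_reverse.mp hp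
    simp only [Function.comp_apply]
    unfold paPred
    rw [h2, getD_tuOf L p.1 p.2 hmem hnd, hP]
  have hAside : feedA oA u = ((F.reverse.take 10).map (fun q => q.2.2)) := by
    rw [feedA_closed, h1, List.map_reverse.symm, List.filter_map,
      List.filter_congr (q := fun p : Int × Int => P p.1) hattr, List.filter_reverse]
    have hLf : L.filter (fun p => P p.1) = F.map (·.2) := by
      rw [hF, hE, show (fun q : Int × (Int × Int) => P q.2.1) =
        ((fun p : Int × Int => P p.1) ∘ (fun x : Int × (Int × Int) => x.2)) from rfl,
        ← List.filter_map, PySem.List.map_snd_enumerate]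
    rw [hLf, ← List.map_reverse]
    simp only [List.map_take, List.map_map]
    rfl
  -- ==== B side ====
  have hcn : ((oA.fo.getD u []).filter (fun v => !(v == u))).Nodup := (h6 u).filter _
  have hcands : (u :: ((oA.fo.getD u []).filter (fun v => !(v == u)))).Nodup := by
    refine List.nodup_cons.mpr ⟨fun hmem => ?_, hcn⟩
    have := (List.mem_filter.mp hmem).2
    simp at this
  have hPc : ∀ v : Int, decide (v ∈ u :: ((oA.fo.getD u []).filter (fun w => !(w == u)))) = P v := by
    intro v
    by_cases hvu : v = u
    · simp [hvu, hP]
    · by_cases hcu : oA.fo.contains u = true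
      · simp [List.mem_cons, hvu, hcu, List.mem_filter, hP]
      · have hnil : oA.fo.getD u [] = [] :=
          PySem.Dict.getD_of_not_contains _ _ (by simpa using hcu)
        simp [List.mem_cons, hvu, hnil, hP, (by simpa using hcu : oA.fo.contains u = false)]
  have hperm : (((u :: ((oA.fo.getD u []).filter (fun v => !(v == u)))).flatMap
      (fun c => E.filter (fun q => q.2.1 == c)))).Perm F := by
    refine (flatMap_filter_perm (fun q => q.2.1) E _ hcands).trans ?_
    have hfc : E.filter (fun q => decide (q.2.1 ∈
        u :: ((oA.fo.getD u []).filter (fun w => !(w == u))))) = F := by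
      rw [hF]
      exact List.filter_congr (fun (q : Int × (Int × Int)) _ => hPc q.2.1)
    exact hfc ▸ List.Perm.refl _
  have hpairF : (F.map (fun q : Int × (Int × Int) => (q.1, q.2.2))).Pairwise
      (fun a b => a.1 < b.1) := by
    rw [List.pairwise_map]
    exact List.Pairwise.sublist List.filter_sublist (enum_pairwise L 0)
  have hBside : feedB oB u =
      ((F.map (fun q => (q.1, q.2.2))).reverse.take 10).map (fun p : Int × Int => p.2) := by
    unfold feedB
    rw [h5, h3]
    dsimp only
    rw [PySem.List.foldl_append_eq_flatMap, List.nil_append]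
    have hitems : ((u :: ((oA.fo.getD u []).filter (fun v => !(v == u)))).flatMap
        (fun c => (tlOf L).getD c [])) =
        (((u :: ((oA.fo.getD u []).filter (fun v => !(v == u)))).flatMap
          (fun c => E.filter (fun q => q.2.1 == c))).map (fun q => (q.1, q.2.2))) := by
      rw [List.map_flatMap]
      exact List.flatMap_congr (fun c _ => getD_tlOf L c)
    rw [hitems]
    rw [PySem.List.sorted_rev_eq_of_perm_of_pairwise_gt _
      ((F.map (fun q => (q.1, q.2.2))).reverse) (fun p => p.1)
      ((List.reverse_perm _).trans (hperm.map _).symm)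
      (List.pairwise_reverse.mpr (by simpa using hpairF))]
    rw [PySem.List.slice_to _ (by norm_num)]
    rfl
  rw [hAside, hBside, ← List.map_reverse, ← List.map_take, List.map_map]
  rfl

theorem follow_eq (oA : TwA) (oB : TwB) (L : List (Int × Int)) (f e : Int) (hInv : StInv oA oB L) :
    StInv (followA oA f e) (followB oB f e) L := by
  obtain ⟨h1, h2, h3, h4, h5, h6⟩ := hInv
  have hfo : (followB oB f e).following = (followA oA f e).fo ∧
      ∀ k : Int, ((followA oA f e).fo.getD k []).Nodup := by
    unfold followA followB
    by_cases hc : oA.fo.contains f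
    · rw [h5, PySem.Dict.setdefault_of_contains _ _ hc]
      by_cases hm : (oA.fo.getD f []).contains e
      · simp only [hm, hc]
        exact ⟨by trivial, h6⟩
      · simp only [hm, hc, Bool.false_eq_true, if_false, if_true]
        refine ⟨by trivial, fun k => ?_⟩
        rw [PySem.Dict.getD_modify]
        split_ifs with hk
        · have hne : e ∉ oA.fo.getD f [] := by
            simpa using hm
          simp [List.nodup_append, h6 f]
          exact fun a ha hae => hne (hae ▸ ha)
        · exact h6 k
    · rw [h5, PySem.Dict.setdefault_of_not_contains _ _ (by simpa using hc)]
      have hg : ((oA.fo.insert f []).getD f []).contains e = false := by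
        rw [PySem.Dict.getD_insert_self]; rfl
      simp only [hc, hg, Bool.false_eq_true, if_false]
      rw [PySem.Dict.modify, PySem.Dict.getD_insert_self, PySem.Dict.insert_insert_self]
      refine ⟨rfl, fun k => ?_⟩
      rw [PySem.Dict.getD_insert]
      split_ifs with hk
      · simp
      · exact h6 k
  refine ⟨?_, ?_, ?_, ?_, hfo.1, hfo.2⟩
  · simp [followA, h1]
  · simp [followA, h2]
  · simp only [followB]; split_ifs <;> simp [h3]
  · simp only [followB]; split_ifs <;> simp [h4]

theorem unfollow_eq (oA : TwA) (oB : TwB) (L : List (Int × Int)) (f e : Int) (hInv : StInv oA oB L) :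
    StInv (unfollowA oA f e) (unfollowB oB f e) L := by
  obtain ⟨h1, h2, h3, h4, h5, h6⟩ := hInv
  have hfo : (unfollowB oB f e).following = (unfollowA oA f e).fo ∧
      ∀ k : Int, ((unfollowA oA f e).fo.getD k []).Nodup := by
    unfold unfollowA unfollowB
    rw [h5]
    by_cases hc : oA.fo.contains f
    · obtain ⟨fl, hfl⟩ : ∃ fl, oA.fo.get? f = some fl := by
        rw [PySem.Dict.contains_eq_isSome_get?] at hc
        exact Option.isSome_iff_exists.mp hc
      have hgd : oA.fo.getD f [] = fl := by rw [PySem.Dict.getD_eq_get?_getD, hfl]; rfl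
      rw [hfl]
      simp only [hc, if_true, hgd]
      by_cases hm : fl.contains e
      · obtain ⟨i, hi⟩ : ∃ i, List.idxOf? e fl = some i := by
          refine Option.isSome_iff_exists.mp ?_
          rw [List.isSome_idxOf?]
          simpa using hm
        simp only [hm, if_true, PySem.List.index?, PySem.List.remove?, hi, Option.map_some,
          Option.getD_some]
        refine ⟨by trivial, fun k => ?_⟩
        rw [PySem.Dict.getD_insert]
        split_ifs with hk
        · exact (fl.eraseIdx_sublist i).nodup (hgd ▸ h6 f)
        · exact h6 k
      · simp only [hm, Bool.false_eq_true, if_false]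
        exact ⟨by trivial, h6⟩
    · have hn : oA.fo.get? f = none := by
        rw [PySem.Dict.contains_eq_isSome_get?] at hc
        exact Option.not_isSome_iff_eq_none.mp (by simp [hc])
      rw [hn]
      simp only [hc, Bool.false_eq_true, if_false]
      exact ⟨by trivial, h6⟩
  refine ⟨?_, ?_, ?_, ?_, hfo.1, hfo.2⟩
  · simp only [unfollowA]; split_ifs <;> simp [h1]
  · simp only [unfollowA]; split_ifs <;> simp [h2]
  · simp only [unfollowB]
    cases oB.following.get? f
    · simp [h3]
    · dsimp only; split_ifs <;> simp [h3]
  · simp only [unfollowB]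
    cases oB.following.get? f
    · simp [h4]
    · dsimp only; split_ifs <;> simp [h4]

theorem post_eq (oA : TwA) (oB : TwB) (L : List (Int × Int)) (u t : Int) (hInv : StInv oA oB L) :
    StInv (postA oA u t) (postB oB u t) (L ++ [(u, t)]) := by
  obtain ⟨h1, h2, h3, h4, h5, h6⟩ := hInv
  refine ⟨?_, ?_, ?_, ?_, ?_, ?_⟩
  · simp [postA, h1]
  · simp [postA, h2, tuOf, List.foldl_append]
  · simp [postB, h3, h4, tlOf, PySem.List.enumerate_append, List.foldl_append]
  · simp [postB, h4]
  · simpa [postA, postB] using h5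
  · simpa [postA] using h6

theorem postedOf_cons (l2 : List (List Int)) (p : Int × String) (ps : List (Int × String)) :
    postedOf l2 (p :: ps) =
      (if p.2 = "postTweet" then [PySem.List.pyGetD (PySem.List.pyGetD l2 p.1 []) 1 0] else [])
        ++ postedOf l2 ps := by
  simp only [postedOf, List.filterMap_cons]
  split_ifs <;> simp

theorem stInv_init : StInv twInit tbInit [] := by
  refine ⟨rfl, rfl, rfl, rfl, rfl, ?_⟩
  intro k
  simp [twInit, PySem.Dict.getD_empty]

theorem run_rel (l2 : List (List Int)) :
    ∀ (ps : List (Int × String)) (sA : Option TwA) (sB : Option TwB) (L : List (Int × Int))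
      (ans : List (Option (List Int))),
      RelSt sA sB L → (L.map (·.2) ++ postedOf l2 ps).Nodup →
      (ps.foldl (stepA l2) (sA, ans)).2 = (ps.foldl (stepB l2) (sB, ans)).2 := by
  intro ps
  induction ps with
  | nil => intro sA sB L ans _ _; rfl
  | cons p ps ih =>
    intro sA sB L ans hrel hnd
    rw [postedOf_cons] at hnd
    simp only [List.foldl_cons]
    by_cases hT : p.2 = "Twitter"
    · simp only [stepA, stepB, hT, if_pos]
      refine ih (some twInit) (some tbInit) [] (ans ++ [none]) stInv_init ?_
      have hne : ¬ p.2 = "postTweet" := by simp [hT]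
      simp only [hne] at hnd
      simp only [List.map_nil, List.nil_append]
      exact hnd.of_append_right
    · cases sA with
      | none =>
        cases sB with
        | none =>
          have hL : L = [] := hrel
          subst hL
          simp only [stepA, stepB, hT]
          refine ih none none [] ans rfl ?_
          simp only [List.map_nil, List.nil_append] at hnd ⊢
          exact (List.sublist_append_right _ _).nodup hnd
        | some oB => exact absurd hrel (by simp [RelSt])
      | some oA =>
        cases sB with
        | none => exact absurd hrel (by simp [RelSt])
        | some oB =>
          have hInv : StInv oA oB L := hrel
          by_cases hP : p.2 = "postTweet"
          · simp only [stepA, stepB, hP, if_pos]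
            refine ih _ _ (L ++ [(PySem.List.pyGetD (PySem.List.pyGetD l2 p.1 []) 0 0,
              PySem.List.pyGetD (PySem.List.pyGetD l2 p.1 []) 1 0)]) _ (post_eq _ _ _ _ _ hInv) ?_
            simp only [hP, if_pos] at hnd
            simpa [List.append_assoc] using hnd
          · have hnd' : (L.map (·.2) ++ postedOf l2 ps).Nodup := by
              simp only [hP] at hnd; exact hnd
            by_cases hG : p.2 = "getNewsFeed"
            · simp only [stepA, stepB, hG, if_pos]
              rw [feed_eq oA oB L _ hInv (hnd'.of_append_left)]
              exact ih _ _ L _ hInv hnd'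
            · by_cases hF : p.2 = "follow"
              · simp only [stepA, stepB, hF, if_pos]
                exact ih _ _ L _ (follow_eq _ _ _ _ _ hInv) hnd'
              · by_cases hU : p.2 = "unfollow"
                · simp only [stepA, stepB, hU, if_pos]
                  exact ih _ _ L _ (unfollow_eq _ _ _ _ _ hInv) hnd'
                · simp only [stepA, stepB, hT, hP, hG, hF, hU]
                  exact ih _ _ L _ hInv hnd'


-- ===== VERDICT (by name: the statement is the Claim_ definition above) =====
theorem help_funct_spec : Claim_equal_help_funct := by
  intro l1 l2 _hdom hpre
  unfold Spec_help_funct help_funct help_funct_alt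
  exact run_rel l2 (PySem.List.enumerate l1 0) none none [] [] rfl (by simpa [postedOf, postedIds] using hpre.2)
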